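-- pv_equiv track=rewrite | github.com/kimminki10/algorithms2 | z.uncategorized/boj1052.py | gogo
-- ===== SOURCE A (Python) =====
-- def gogo(t, n, k):
--     if n <= k:
--         return 0
--     if k == 1:
--         a = 1
--         while a < n: a *= 2
--         return a - n
--
--     while t > n: t //= 2
--     return gogo(t, n-t, k-1)
-- ===== SOURCE B (Python) =====
-- def gogo(t, n, k):
--     # Iterative version: the recursion becomes a while loop, and both inner
--     # loops (repeated halving of t, doubling a up to n) are replaced by
--     # bit-length arithmetic (single shifts) instead of O(log) Python loops.
--     while n > k:
--         if k == 1: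
--             return (1 << (n - 1).bit_length()) - n
--         if t > n:
--             t >>= t.bit_length() - n.bit_length()
--             if t > n:
--                 t >>= 1
--         n -= t
--         k -= 1
--     return 0
-- ===== Notes on version B (the rewrite author's own statement) =====
-- stated objective: alternative
-- what changed: The tail recursion becomes an explicit while loop and both inner loops (halving t until t <= n, doubling a until a >= n) are replaced by single bit-length-based shifts.
import Mathlib
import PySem

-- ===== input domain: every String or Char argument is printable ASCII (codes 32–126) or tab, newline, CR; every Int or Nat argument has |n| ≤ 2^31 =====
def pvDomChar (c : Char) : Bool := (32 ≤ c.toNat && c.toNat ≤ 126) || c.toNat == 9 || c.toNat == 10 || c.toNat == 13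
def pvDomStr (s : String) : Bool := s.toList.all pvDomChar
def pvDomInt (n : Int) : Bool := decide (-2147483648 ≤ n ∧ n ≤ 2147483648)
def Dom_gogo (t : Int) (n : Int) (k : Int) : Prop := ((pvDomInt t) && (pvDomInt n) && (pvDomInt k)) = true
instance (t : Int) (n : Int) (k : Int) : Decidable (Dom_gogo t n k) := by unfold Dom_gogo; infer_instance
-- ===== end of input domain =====

-- B replaces A's tail recursion by a while loop and replaces both of A's inner
-- loops by single bit-length-based shifts (alternative decomposition, same cost class).

-- ===== PORT A =====
-- `while t > n: t //= 2`; fuel t.toNat+1 suffices (halving a positive t reaches ≤ n)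
def gogoHalve : Nat → Int → Int → Int
  | 0, t, _ => t
  | f + 1, t, n => if n < t then gogoHalve f (PySem.Int.floordiv t 2) n else t

-- `a = 1; while a < n: a *= 2`; fuel n.toNat+1 suffices
def gogoPow : Nat → Int → Int → Int
  | 0, a, _ => a
  | f + 1, a, n => if a < n then gogoPow f (a * 2) n else a

-- the recursion itself; fuel k.toNat+1 suffices inside Pre_ (k decreases by 1 per call)
def gogoF : Nat → Int → Int → Int → Int
  | 0, _, _, _ => 0
  | f + 1, t, n, k =>
    if n ≤ k then 0
    else if k = 1 then gogoPow (n.toNat + 1) 1 n - n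
    else
      let t' := gogoHalve (t.toNat + 1) t n
      gogoF f t' (n - t') (k - 1)

def gogo (t : Int) (n : Int) (k : Int) : Int := gogoF (k.toNat + 1) t n k

-- ===== PORT B =====
-- one loop iteration's update of t: `if t > n: t >>= t.bit_length() - n.bit_length(); if t > n: t >>= 1`
-- (Python `x >> s` on the nonnegative x reached here = floor division by 2^s; the
-- shift amount is nonnegative whenever t > n ≥ 1, i.e. everywhere inside Pre_)
def gogoAltShift (t : Int) (n : Int) : Int :=
  if n < t then
    let s : Nat := PySem.Int.bitLength t - PySem.Int.bitLength n
    let t1 := PySem.Int.floordiv t (2 ^ s)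
    if n < t1 then PySem.Int.floordiv t1 2 else t1
  else t

-- the `while n > k:` loop of Source B; fuel k.toNat+1 suffices inside Pre_
def gogoAltF : Nat → Int → Int → Int → Int
  | 0, _, _, _ => 0
  | f + 1, t, n, k =>
    if k < n then
      if k = 1 then 2 ^ PySem.Int.bitLength (n - 1) - n   -- 1 << (n-1).bit_length()
      else
        let t' := gogoAltShift t n
        gogoAltF f t' (n - t') (k - 1)
    else 0

def gogo_alt (t : Int) (n : Int) (k : Int) : Int := gogoAltF (k.toNat + 1) t n k

-- ===== PRECONDITION & SPEC =====
-- Pre_ excludes exactly the inputs with k ≤ 0 ∧ n > k, on which A never returns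
-- (its halving loop spins forever, or the recursion on ever-decreasing k hits
-- Python's RecursionError); A returns a value on every input satisfying Pre_.
def Pre_gogo (t : Int) (n : Int) (k : Int) : Prop := n ≤ k ∨ 1 ≤ k
instance (t : Int) (n : Int) (k : Int) : Decidable (Pre_gogo t n k) := by unfold Pre_gogo; infer_instance

def pvWitness_gogo : Int × Int × Int := (1000, 13, 2)

def Spec_gogo (t : Int) (n : Int) (k : Int) (out : Int) : Prop := out = gogo_alt t n k
instance (t : Int) (n : Int) (k : Int) (out : Int) : Decidable (Spec_gogo t n k out) := by unfold Spec_gogo; infer_instance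

-- ===== CLAIM (what is proved, stated in full; the proofs are below) =====
def Claim_equal_gogo : Prop := ∀ (t : Int) (n : Int) (k : Int), Dom_gogo t n k → Pre_gogo t n k → Spec_gogo t n k (gogo t n k)

-- ===== LEMMAS AND PROOFS =====

-- arithmetic facts about floordiv by 2
theorem pvFd2_lt {t : Int} (h : 0 < t) : PySem.Int.floordiv t 2 < t := by
  rw [PySem.Int.floordiv_eq_ediv_of_pos (by norm_num)]; omega

theorem pvFd2_pos {t : Int} (h : 2 ≤ t) : 1 ≤ PySem.Int.floordiv t 2 := by
  rw [PySem.Int.floordiv_eq_ediv_of_pos (by norm_num)]; omega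

-- bitLength facts
theorem pvBl_pos {n : Int} (h : 0 < n) : 1 ≤ PySem.Int.bitLength n := by
  by_contra hc
  have h0 : PySem.Int.bitLength n = 0 := by omega
  have h1 := PySem.Int.lt_two_pow_bitLength n
  rw [h0] at h1
  simp at h1
  omega

theorem pvBl_mono {a b : Int} (ha : 0 < a) (hab : a ≤ b) :
    PySem.Int.bitLength a ≤ PySem.Int.bitLength b := by
  by_contra hc
  have h1 := PySem.Int.lt_two_pow_bitLength b
  have h2 := PySem.Int.two_pow_bitLength_le a (by omega)
  have h3 : (2:Nat) ^ PySem.Int.bitLength b ≤ 2 ^ (PySem.Int.bitLength a - 1) := by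
    have := pvBl_pos ha
    exact Nat.pow_le_pow_right (by norm_num) (by omega)
  omega

-- (t // 2) // 2^s = t // 2^(s+1)  for 0 ≤ t
theorem pvFd_pow_step {t : Int} (ht : 0 ≤ t) (s : Nat) :
    PySem.Int.floordiv (PySem.Int.floordiv t 2) ((2:Int) ^ s)
      = PySem.Int.floordiv t ((2:Int) ^ (s + 1)) := by
  obtain ⟨T, rfl⟩ := Int.eq_ofNat_of_zero_le ht
  have e1 : PySem.Int.floordiv (↑T) 2 = ((T / 2 : Nat) : Int) := by
    exact_mod_cast PySem.Int.floordiv_natCast T 2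
  have e2 : ((2:Int) ^ s) = ((2 ^ s : Nat) : Int) := by push_cast; ring
  have e3 : ((2:Int) ^ (s + 1)) = ((2 ^ (s + 1) : Nat) : Int) := by push_cast; ring
  rw [e1, e2, e3, PySem.Int.floordiv_natCast, PySem.Int.floordiv_natCast]
  have : T / 2 / 2 ^ s = T / 2 ^ (s + 1) := by
    rw [Nat.div_div_eq_div_mul]
    congr 1
    ring
  rw [this]

-- halving t once does not change the value B's shift expression produces
theorem pvShift_step {t n : Int} (hn : 1 ≤ n) (ht : n < t) :
    gogoAltShift (PySem.Int.floordiv t 2) n = gogoAltShift t n := by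
  have ht2 : 2 ≤ t := by omega
  have hpos : 1 ≤ PySem.Int.floordiv t 2 := pvFd2_pos ht2
  have hblt : PySem.Int.bitLength t = PySem.Int.bitLength (PySem.Int.floordiv t 2) + 1 :=
    PySem.Int.bitLength_of_pos (by omega)
  have hmono : PySem.Int.bitLength n ≤ PySem.Int.bitLength t := pvBl_mono (by omega) ht.le
  simp only [gogoAltShift]
  by_cases hc : n < PySem.Int.floordiv t 2
  · have hm2 : PySem.Int.bitLength n ≤ PySem.Int.bitLength (PySem.Int.floordiv t 2) :=
      pvBl_mono (by omega) hc.le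
    rw [if_pos hc, if_pos ht]
    have hs : PySem.Int.bitLength t - PySem.Int.bitLength n
        = (PySem.Int.bitLength (PySem.Int.floordiv t 2) - PySem.Int.bitLength n) + 1 := by
      omega
    rw [hs, ← pvFd_pow_step (by omega)]
  · rw [if_neg hc, if_pos ht]
    by_cases heq : PySem.Int.bitLength t = PySem.Int.bitLength n
    · -- equal bit lengths: the shift amount is 0 and one extra halving happens
      have hs : PySem.Int.bitLength t - PySem.Int.bitLength n = 0 := by omega
      rw [hs, pow_zero, PySem.Int.floordiv_eq_ediv_of_pos (by norm_num : (0:Int) < 1),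
        Int.ediv_one, if_pos ht]
    · -- bit length drops to exactly bL n: shift amount is 1, no extra halving
      have h1 : PySem.Int.bitLength (PySem.Int.floordiv t 2) = PySem.Int.bitLength n := by
        have hle : PySem.Int.bitLength (PySem.Int.floordiv t 2) ≤ PySem.Int.bitLength n := by
          by_contra hgt
          have h2 := PySem.Int.lt_two_pow_bitLength n
          have h6 := PySem.Int.two_pow_bitLength_le (PySem.Int.floordiv t 2) (by omega)
          have h4 : (2:Nat) ^ PySem.Int.bitLength n
              ≤ 2 ^ (PySem.Int.bitLength (PySem.Int.floordiv t 2) - 1) :=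
            Nat.pow_le_pow_right (by norm_num) (by omega)
          omega
        omega
      have hs : PySem.Int.bitLength t - PySem.Int.bitLength n = 1 := by omega
      rw [hs, pow_one, if_neg hc]

-- A's halving loop = B's shift expression, and the result is ≤ n
theorem pvHalve_spec : ∀ f : Nat, ∀ t n : Int, 1 ≤ n → t.toNat ≤ f →
    gogoHalve (f + 1) t n = gogoAltShift t n ∧ gogoHalve (f + 1) t n ≤ n := by
  intro f
  induction f using Nat.strong_induction_on with
  | _ f IH =>
    intro t n hn hf
    simp only [gogoHalve]
    by_cases hc : n < t
    · have ht2 : 2 ≤ t := by omega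
      have hpos : 1 ≤ PySem.Int.floordiv t 2 := pvFd2_pos ht2
      have hlt : PySem.Int.floordiv t 2 < t := pvFd2_lt (by omega)
      obtain ⟨f', rfl⟩ : ∃ f', f = f' + 1 := ⟨f - 1, by omega⟩
      have hrec := IH f' (by omega) (PySem.Int.floordiv t 2) n hn (by omega)
      rw [if_pos hc]
      exact ⟨hrec.1.trans (pvShift_step hn hc), hrec.2⟩
    · rw [if_neg hc]
      refine ⟨?_, by omega⟩
      simp only [gogoAltShift]
      rw [if_neg hc]

-- A's doubling loop from 1 reaches 2 ^ (n-1).bit_length()  (n ≥ 2)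
theorem pvPow_loop (n : Int) (hn : 2 ≤ n) :
    ∀ f j : Nat, j ≤ PySem.Int.bitLength (n - 1) →
      PySem.Int.bitLength (n - 1) - j < f →
      gogoPow f ((2:Int) ^ j) n = 2 ^ PySem.Int.bitLength (n - 1) := by
  have key1 : n ≤ (2:Int) ^ PySem.Int.bitLength (n - 1) := by
    have h1 := PySem.Int.lt_two_pow_bitLength (n - 1)
    have h2 : ((2:Int) ^ PySem.Int.bitLength (n - 1))
        = ((2 ^ PySem.Int.bitLength (n - 1) : Nat) : Int) := by push_cast; ring
    rw [h2]; omega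
  have key2 : (2:Int) ^ (PySem.Int.bitLength (n - 1) - 1) ≤ n - 1 := by
    have h1 := PySem.Int.two_pow_bitLength_le (n - 1) (by omega)
    have h2 : ((2:Int) ^ (PySem.Int.bitLength (n - 1) - 1))
        = ((2 ^ (PySem.Int.bitLength (n - 1) - 1) : Nat) : Int) := by push_cast; ring
    rw [h2]; omega
  intro f
  induction f with
  | zero => intro j hj hf; omega
  | succ f IH =>
    intro j hj hf
    simp only [gogoPow]
    by_cases hc : (2:Int) ^ j < n
    · have hjM : j < PySem.Int.bitLength (n - 1) := by
        rcases Nat.lt_or_ge j (PySem.Int.bitLength (n - 1)) with h | h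
        · exact h
        · exfalso
          have : j = PySem.Int.bitLength (n - 1) := by omega
          rw [this] at hc
          omega
      rw [if_pos hc, show ((2:Int) ^ j * 2) = 2 ^ (j + 1) from by ring]
      exact IH (j + 1) (by omega) (by omega)
    · rw [if_neg hc]
      congr 1
      by_contra hne
      have hjlt : j < PySem.Int.bitLength (n - 1) := by omega
      have : (2:Int) ^ j ≤ 2 ^ (PySem.Int.bitLength (n - 1) - 1) :=
        pow_le_pow_right₀ (by norm_num) (by omega)
      omega

theorem pvPow_branch (n : Int) (hn : 2 ≤ n) :
    gogoPow (n.toNat + 1) 1 n = (2:Int) ^ PySem.Int.bitLength (n - 1) := by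
  have hM1 : 1 ≤ PySem.Int.bitLength (n - 1) := pvBl_pos (by omega)
  have hMn : PySem.Int.bitLength (n - 1) ≤ n.toNat := by
    have h1 := PySem.Int.two_pow_bitLength_le (n - 1) (by omega)
    have h2 : PySem.Int.bitLength (n - 1) - 1 < 2 ^ (PySem.Int.bitLength (n - 1) - 1) :=
      Nat.lt_two_pow_self
    omega
  have := pvPow_loop n hn (n.toNat + 1) 0 (Nat.zero_le _) (by omega)
  rw [pow_zero] at this
  exact this

-- main loop/recursion equivalence (matched fuel)
theorem pvMain : ∀ f : Nat, ∀ t n k : Int, 1 ≤ k → 0 ≤ n → k.toNat ≤ f →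
    gogoF f t n k = gogoAltF f t n k := by
  intro f
  induction f with
  | zero => intro t n k hk hn hf; omega
  | succ f IH =>
    intro t n k hk hn hf
    simp only [gogoF, gogoAltF]
    by_cases h1 : n ≤ k
    · rw [if_pos h1, if_neg (by omega : ¬ k < n)]
    · rw [if_neg h1, if_pos (by omega : k < n)]
      by_cases h2 : k = 1
      · rw [if_pos h2, if_pos h2, pvPow_branch n (by omega)]
      · rw [if_neg h2, if_neg h2]
        have hsp := pvHalve_spec t.toNat t n (by omega) (le_refl _)
        rw [hsp.1]
        have hle : gogoAltShift t n ≤ n := hsp.1 ▸ hsp.2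
        exact IH (gogoAltShift t n) (n - gogoAltShift t n) (k - 1)
          (by omega) (by omega) (by omega)

-- ===== VERDICT (by name: the statement is the Claim_ definition above) =====
theorem gogo_spec : Claim_equal_gogo := by
  intro t n k _ hpre
  unfold Spec_gogo gogo gogo_alt
  by_cases h1 : n ≤ k
  · simp only [gogoF, gogoAltF]
    rw [if_pos h1, if_neg (by omega : ¬ k < n)]
  · have hk : 1 ≤ k := by
      rcases hpre with h | h
      · omega
      · exact h
    exact pvMain (k.toNat + 1) t n k hk (by omega) (by omega)
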